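-- pv_equiv track=rewrite | github.com/smith-cameron/AlgorithmBible | python/02-FundamentalsII/02-funII.py | messyMath
-- ===== SOURCE A (Python) =====
-- def messyMath(num):
--     sum = 0
--     for i in range(num+1):
--         if i % 3 == 0:
--             continue
--         if i % 7 == 0:
--             sum += (i*2)
--         else:
--             sum += i
--         if i == (num % 3 == 0):
--             return -1
--     return sum
-- ===== SOURCE B (Python) =====
-- def messyMath(num):
--     # Closed form: sum of 1..n minus multiples of 3, plus an extra copy of
--     # multiples of 7 that are not multiples of 21, via triangular numbers.
--     if num < 1:
--         return 0
--     if num % 3 == 0: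
--         return -1
--     tri = lambda m: m * (m + 1) // 2
--     return (tri(num) - 3 * tri(num // 3)
--             + 7 * tri(num // 7) - 21 * tri(num // 21))
-- ===== Notes on version B (the rewrite author's own statement) =====
-- stated objective: faster
-- what changed: Replaces the O(num) accumulation loop by an O(1) closed form: inclusion-exclusion over triangular numbers (tri(n) - 3*tri(n//3) + 7*tri(n//7) - 21*tri(n//21)), with the early-return guard reduced to the direct test num>=1 and num%3==0.
import Mathlib
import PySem

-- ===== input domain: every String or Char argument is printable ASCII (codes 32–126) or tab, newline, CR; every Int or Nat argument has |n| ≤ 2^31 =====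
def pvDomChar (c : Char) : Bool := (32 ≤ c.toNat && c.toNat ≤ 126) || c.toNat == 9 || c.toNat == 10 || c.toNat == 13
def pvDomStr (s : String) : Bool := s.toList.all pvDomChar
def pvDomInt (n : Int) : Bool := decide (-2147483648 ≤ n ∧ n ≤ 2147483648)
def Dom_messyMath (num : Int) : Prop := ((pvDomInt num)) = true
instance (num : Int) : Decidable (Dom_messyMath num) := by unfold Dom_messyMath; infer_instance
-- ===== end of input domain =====

-- B replaces A's O(num) loop by an O(1) closed form (inclusion-exclusion over
-- triangular numbers); the early-return guard becomes the test num ≥ 1 ∧ num % 3 = 0.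

-- ===== PORT A =====
-- the loop body of A, with Python's early return modelled by returning -1 and
-- stopping the recursion; `i == (num % 3 == 0)` compares i with the bool-as-int 1/0
def messyMathLoop (num : Int) : List Int → Int → Int
  | [], s => s
  | i :: rest, s =>
    if PySem.Int.mod i 3 = 0 then messyMathLoop num rest s
    else
      let s' := if PySem.Int.mod i 7 = 0 then s + i * 2 else s + i
      if i = (if PySem.Int.mod num 3 = 0 then (1 : Int) else 0) then -1
      else messyMathLoop num rest s'

def messyMath (num : Int) : Int :=
  messyMathLoop num (PySem.List.pyRange 0 (num + 1) 1) 0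

-- ===== PORT B =====
def messyMathTri (m : Int) : Int := PySem.Int.floordiv (m * (m + 1)) 2

def messyMath_alt (num : Int) : Int :=
  if num < 1 then 0
  else if PySem.Int.mod num 3 = 0 then -1
  else
    messyMathTri num - 3 * messyMathTri (PySem.Int.floordiv num 3)
      + 7 * messyMathTri (PySem.Int.floordiv num 7)
      - 21 * messyMathTri (PySem.Int.floordiv num 21)

-- ===== PRECONDITION & SPEC =====
def Spec_messyMath (num : Int) (out : Int) : Prop := out = messyMath_alt num
instance (num : Int) (out : Int) : Decidable (Spec_messyMath num out) := by unfold Spec_messyMath; infer_instance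

-- ===== CLAIM (what is proved, stated in full; the proofs are below) =====
def Claim_equal_messyMath : Prop := ∀ (num : Int), Dom_messyMath num → Spec_messyMath num (messyMath num)

-- ===== LEMMAS AND PROOFS =====

-- the per-element contribution of A's loop when the early return never fires
def fA (i : Int) : Int :=
  if PySem.Int.mod i 3 = 0 then 0 else if PySem.Int.mod i 7 = 0 then i * 2 else i

theorem modP (i b : Int) (hb : 0 < b) : PySem.Int.mod i b = i % b :=
  PySem.Int.mod_eq_emod_of_pos hb

-- when num % 3 ≠ 0 the early return can only fire at i = 0, so on a list of
-- positive i's the loop is a plain fold of fA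
theorem loop_sum (num : Int) (h3 : PySem.Int.mod num 3 ≠ 0) :
    ∀ (l : List Int), (∀ i ∈ l, 1 ≤ i) → ∀ s, messyMathLoop num l s = s + (l.map fA).sum := by
  intro l
  induction l with
  | nil => intro _ s; simp [messyMathLoop]
  | cons i l ih =>
    intro hmem s
    have hi : (1 : Int) ≤ i := hmem i (List.mem_cons_self ..)
    have hmem' : ∀ j ∈ l, (1 : Int) ≤ j := fun j hj => hmem j (List.mem_cons_of_mem _ hj)
    by_cases hi3 : PySem.Int.mod i 3 = 0
    · simp only [messyMathLoop, if_pos hi3, fA, List.map_cons, List.sum_cons]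
      rw [ih hmem' s]; ring
    · simp only [messyMathLoop, if_neg hi3, if_neg h3]
      rw [if_neg (by omega : ¬ i = 0)]
      by_cases hi7 : PySem.Int.mod i 7 = 0
      · simp only [if_pos hi7, fA, List.map_cons, List.sum_cons, if_neg hi3]
        rw [ih hmem']; ring
      · simp only [if_neg hi7, fA, List.map_cons, List.sum_cons, if_neg hi3]
        rw [ih hmem']; ring

def T (m : Nat) : Nat := m * (m + 1) / 2

theorem tri_succ (m : Nat) : T (m + 1) = T m + (m + 1) := by
  show (m + 1) * (m + 1 + 1) / 2 = m * (m + 1) / 2 + (m + 1)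
  rw [show (m + 1) * (m + 1 + 1) = m * (m + 1) + 2 * (m + 1) by ring,
      Nat.add_mul_div_left _ _ (by norm_num)]

def C (n : Nat) : Int :=
  (T n : Int) - 3 * (T (n / 3) : Int) + 7 * (T (n / 7) : Int) - 21 * (T (n / 21) : Int)

theorem key (n : Nat) :
    ((PySem.List.pyRange 1 ((n : Int) + 1) 1).map fA).sum = C n := by
  induction n with
  | zero =>
    rw [PySem.List.pyRange_one_eq_nil (by norm_num)]
    simp [C, T]
  | succ n ih =>
    have hc : ((n + 1 : Nat) : Int) + 1 = ((n : Int) + 1) + 1 := by push_cast; ring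
    rw [hc, PySem.List.pyRange_one_succ_right (by omega : (1 : Int) ≤ (n : Int) + 1),
        List.map_append, List.sum_append, ih]
    simp only [List.map_cons, List.map_nil, List.sum_cons, List.sum_nil, add_zero]
    unfold fA
    rw [modP _ _ (by norm_num), modP _ _ (by norm_num)]
    by_cases h3 : (n + 1) % 3 = 0 <;> by_cases h7 : (n + 1) % 7 = 0
    · have e3 : (n + 1) / 3 = n / 3 + 1 := by omega
      have e7 : (n + 1) / 7 = n / 7 + 1 := by omega
      have e21 : (n + 1) / 21 = n / 21 + 1 := by omega
      rw [if_pos (show ((n : Int) + 1) % 3 = 0 by omega)]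
      unfold C
      rw [e3, e7, e21, tri_succ, tri_succ, tri_succ, tri_succ]
      push_cast
      generalize (T n : Int) = a; generalize (T (n / 3) : Int) = b
      generalize (T (n / 7) : Int) = c; generalize (T (n / 21) : Int) = d
      omega
    · have e3 : (n + 1) / 3 = n / 3 + 1 := by omega
      have e7 : (n + 1) / 7 = n / 7 := by omega
      have hmm : (n + 1) % 21 % 7 = (n + 1) % 7 := Nat.mod_mod_of_dvd _ (by norm_num)
      have h21 : (n + 1) % 21 ≠ 0 := fun h => h7 (by rw [← hmm, h])
      have e21 : (n + 1) / 21 = n / 21 := by omega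
      rw [if_pos (show ((n : Int) + 1) % 3 = 0 by omega)]
      unfold C
      rw [e3, e7, e21, tri_succ, tri_succ]
      push_cast
      generalize (T n : Int) = a; generalize (T (n / 3) : Int) = b
      omega
    · have e3 : (n + 1) / 3 = n / 3 := by omega
      have e7 : (n + 1) / 7 = n / 7 + 1 := by omega
      have hmm : (n + 1) % 21 % 3 = (n + 1) % 3 := Nat.mod_mod_of_dvd _ (by norm_num)
      have h21 : (n + 1) % 21 ≠ 0 := fun h => h3 (by rw [← hmm, h])
      have e21 : (n + 1) / 21 = n / 21 := by omega
      rw [if_neg (show ¬ ((n : Int) + 1) % 3 = 0 by omega),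
          if_pos (show ((n : Int) + 1) % 7 = 0 by omega)]
      unfold C
      rw [e3, e7, e21, tri_succ, tri_succ]
      push_cast
      generalize (T n : Int) = a; generalize (T (n / 7) : Int) = c
      omega
    · have e3 : (n + 1) / 3 = n / 3 := by omega
      have e7 : (n + 1) / 7 = n / 7 := by omega
      have hmm : (n + 1) % 21 % 3 = (n + 1) % 3 := Nat.mod_mod_of_dvd _ (by norm_num)
      have h21 : (n + 1) % 21 ≠ 0 := fun h => h3 (by rw [← hmm, h])
      have e21 : (n + 1) / 21 = n / 21 := by omega
      rw [if_neg (show ¬ ((n : Int) + 1) % 3 = 0 by omega),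
          if_neg (show ¬ ((n : Int) + 1) % 7 = 0 by omega)]
      unfold C
      rw [e3, e7, e21, tri_succ]
      push_cast
      generalize (T n : Int) = a
      omega

theorem tri_cast (m : Nat) : messyMathTri (m : Int) = (T m : Int) := by
  unfold messyMathTri T
  have h : ((m : Int) * ((m : Int) + 1)) = ((m * (m + 1) : Nat) : Int) := by push_cast; ring
  rw [h]
  exact_mod_cast PySem.Int.floordiv_natCast (m * (m + 1)) 2

theorem fdiv3 (m : Nat) : PySem.Int.floordiv (m : Int) 3 = ((m / 3 : Nat) : Int) := by
  exact_mod_cast PySem.Int.floordiv_natCast m 3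

theorem fdiv7 (m : Nat) : PySem.Int.floordiv (m : Int) 7 = ((m / 7 : Nat) : Int) := by
  exact_mod_cast PySem.Int.floordiv_natCast m 7

theorem fdiv21 (m : Nat) : PySem.Int.floordiv (m : Int) 21 = ((m / 21 : Nat) : Int) := by
  exact_mod_cast PySem.Int.floordiv_natCast m 21

theorem messyMath_eq (num : Int) : messyMath num = messyMath_alt num := by
  by_cases h1 : num < 1
  · by_cases h0 : num = 0
    · subst h0; decide
    · unfold messyMath messyMath_alt
      rw [PySem.List.pyRange_one_eq_nil (by omega), if_pos h1]
      rfl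
  · rw [not_lt] at h1
    by_cases h3 : PySem.Int.mod num 3 = 0
    · -- early return at i = 1
      unfold messyMath
      rw [PySem.List.pyRange_one_cons (by omega), show (0:Int) + 1 = 1 from by norm_num,
          PySem.List.pyRange_one_cons (by omega)]
      simp only [messyMathLoop]
      rw [if_pos (by decide : PySem.Int.mod (0:Int) 3 = 0)]
      rw [if_neg (by decide : ¬ PySem.Int.mod (1:Int) 3 = 0), if_pos h3,
          if_pos rfl]
      unfold messyMath_alt
      rw [if_neg (by omega), if_pos h3]
    · obtain ⟨n, hn⟩ : ∃ n : Nat, (n : Int) = num := ⟨num.toNat, Int.toNat_of_nonneg (by omega)⟩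
      subst hn
      unfold messyMath
      rw [PySem.List.pyRange_one_cons (by omega), show (0:Int) + 1 = 1 from by norm_num]
      simp only [messyMathLoop]
      rw [if_pos (by decide : PySem.Int.mod (0:Int) 3 = 0),
          loop_sum _ h3 _ (fun i hi => ((PySem.List.mem_pyRange_one).1 hi).1) 0,
          zero_add, key n]
      unfold messyMath_alt
      rw [if_neg (by omega), if_neg h3]
      rw [fdiv3 n, fdiv7 n, fdiv21 n,
          tri_cast, tri_cast, tri_cast, tri_cast]
      unfold C
      ring

-- ===== VERDICT (by name: the statement is the Claim_ definition above) =====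
theorem messyMath_spec : Claim_equal_messyMath := by
  intro num _
  unfold Spec_messyMath
  exact messyMath_eq num
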